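-- pv_equiv track=rewrite | github.com/jrfdy6/aiclone | backend/app/services/social_belief_engine.py | _parse_story_bank
-- ===== SOURCE A (Python) =====
-- def _strip_frontmatter(text: str) -> str:
--     if text.startswith("---"):
--         parts = text.split("---", 2)
--         if len(parts) == 3:
--             return parts[2]
--     return text
--
-- def _parse_markdown_sections(text: str) -> dict[str, list[str]]:
--     current_title = ""
--     sections: dict[str, list[str]] = {}
--     for line in _strip_frontmatter(text).splitlines():
--         if line.startswith("## "):
--             current_title = line.replace("## ", "", 1).strip()
--             sections[current_title] = []
--             continue
--         if current_title:
--             sections[current_title].append(line.rstrip())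
--     return sections
--
-- def _parse_story_bank(text: str) -> list[dict[str, str]]:
--     stories: list[dict[str, str]] = []
--     sections = _parse_markdown_sections(text)
--     for title, lines in sections.items():
--         story = {"title": title, "story_type": "", "use_when": "", "core_point": ""}
--         for line in lines:
--             stripped = line.strip()
--             if stripped.startswith("- Story type:"):
--                 story["story_type"] = stripped.replace("- Story type:", "", 1).strip()
--             elif stripped.startswith("- Use when:"):
--                 story["use_when"] = stripped.replace("- Use when:", "", 1).strip()
--             elif stripped.startswith("- Core point:"):
--                 story["core_point"] = stripped.replace("- Core point:", "", 1).strip()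
--         stories.append(story)
--     return stories
-- ===== SOURCE B (Python) =====
-- def _parse_story_bank(text: str) -> list[dict[str, str]]:
--     body = text
--     if text.startswith("---"):
--         parts = text.split("---", 2)
--         if len(parts) == 3:
--             body = parts[2]
--     stories: dict[str, dict[str, str]] = {}
--     current = ""
--     for line in body.splitlines():
--         if line.startswith("## "):
--             current = line[3:].strip()
--             stories[current] = {"title": current, "story_type": "", "use_when": "", "core_point": ""}
--         elif current:
--             stripped = line.strip()
--             if stripped.startswith("- Story type:"):
--                 stories[current]["story_type"] = stripped[13:].strip()
--             elif stripped.startswith("- Use when:"):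
--                 stories[current]["use_when"] = stripped[11:].strip()
--             elif stripped.startswith("- Core point:"):
--                 stories[current]["core_point"] = stripped[13:].strip()
--     return list(stories.values())
-- ===== Notes on version B (the rewrite author's own statement) =====
-- stated objective: simpler
-- what changed: A builds a sections-by-title table of collected lines and then re-scans every section's lines for the field markers; B is a single streaming pass that keeps an insertion-ordered dict of finished story records keyed by title and updates the current record in place, then returns its values.
import Mathlib
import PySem

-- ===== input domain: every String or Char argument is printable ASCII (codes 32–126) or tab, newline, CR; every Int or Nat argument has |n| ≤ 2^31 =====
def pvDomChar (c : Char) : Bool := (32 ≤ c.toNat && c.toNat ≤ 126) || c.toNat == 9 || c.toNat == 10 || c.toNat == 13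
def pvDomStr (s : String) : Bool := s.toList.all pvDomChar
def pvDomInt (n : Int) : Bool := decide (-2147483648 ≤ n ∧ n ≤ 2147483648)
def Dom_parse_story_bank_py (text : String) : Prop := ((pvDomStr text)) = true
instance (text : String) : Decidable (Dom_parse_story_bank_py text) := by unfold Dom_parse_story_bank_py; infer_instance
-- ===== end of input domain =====

-- B rewrites A's two-phase parse (build a sections-by-title table, then scan each section's
-- lines for the story fields) as ONE streaming pass that keeps an insertion-ordered dict of
-- finished story records and updates the current one in place (objective: simpler, one pass).

-- ===== PORT A =====

-- hand port of str.replace(old, "", 1) for nonempty old: removes the FIRST occurrence of old,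
-- if any (exact there; PySem.Chars.replace has no count argument)
def pvReplaceEmpty1 (s old : List Char) : List Char :=
  let i := PySem.Chars.find s old
  if i < 0 then s else s.take i.toNat ++ s.drop (i.toNat + old.length)

def pvStripFM (text : String) : String :=
  if PySem.Str.startswith text "---" then
    match PySem.Str.splitMax? text "---" 2 with
    | some parts =>
      match parts with
      | [_, _, p2] => p2           -- len(parts) == 3: return parts[2]
      | _ => text
    | none => text
  else text

def pvInitStory (t : String) : PySem.Dict String String :=
  PySem.Dict.ofList [("title", t), ("story_type", ""), ("use_when", ""), ("core_point", "")]

def pvStoryStep (story : PySem.Dict String String) (line : String) : PySem.Dict String String :=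
  let stripped := PySem.Str.strip line
  if PySem.Str.startswith stripped "- Story type:" then
    story.insert "story_type" (PySem.Str.strip (String.ofList (pvReplaceEmpty1 stripped.toList "- Story type:".toList)))
  else if PySem.Str.startswith stripped "- Use when:" then
    story.insert "use_when" (PySem.Str.strip (String.ofList (pvReplaceEmpty1 stripped.toList "- Use when:".toList)))
  else if PySem.Str.startswith stripped "- Core point:" then
    story.insert "core_point" (PySem.Str.strip (String.ofList (pvReplaceEmpty1 stripped.toList "- Core point:".toList)))
  else story

def pvSecStep (st : String × PySem.Dict String (List String)) (line : String) :
    String × PySem.Dict String (List String) :=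
  if PySem.Str.startswith line "## " then
    let t := PySem.Str.strip (String.ofList (pvReplaceEmpty1 line.toList "## ".toList))
    (t, st.2.insert t [])
  else if st.1 ≠ "" then
    -- a nonempty current_title is always a key of sections (set at its heading), so .append is a modify
    (st.1, st.2.modify st.1 [] (fun ls => ls ++ [PySem.Str.rstrip line]))
  else st

def pvSections (text : String) : PySem.Dict String (List String) :=
  ((PySem.Str.splitlines (pvStripFM text)).foldl pvSecStep ("", PySem.Dict.empty)).2

def parse_story_bank_py (text : String) : List (List (String × String)) :=
  (pvSections text).items.foldl
    (fun stories p => stories ++ [(p.2.foldl pvStoryStep (pvInitStory p.1)).items]) []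

-- ===== PORT B =====

def pvStripFM_alt (text : String) : String :=
  if PySem.Str.startswith text "---" then
    match PySem.Str.splitMax? text "---" 2 with
    | some parts =>
      match parts with
      | [_, _, p2] => p2
      | _ => text
    | none => text
  else text

def pvFresh (t : String) : PySem.Dict String String :=
  PySem.Dict.ofList [("title", t), ("story_type", ""), ("use_when", ""), ("core_point", "")]

-- s[k:] for a nonneg literal k is s.toList.drop k (Python's slice clamps exactly as drop does);
-- stories[current][field] = v is a modify at the always-present key current
def pvAltStep (st : String × PySem.Dict String (PySem.Dict String String)) (line : String) :
    String × PySem.Dict String (PySem.Dict String String) :=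
  if PySem.Str.startswith line "## " then
    let t := PySem.Str.strip (String.ofList (line.toList.drop 3))
    (t, st.2.insert t (pvFresh t))
  else if st.1 ≠ "" then
    let s := PySem.Str.strip line
    if PySem.Str.startswith s "- Story type:" then
      (st.1, st.2.modify st.1 PySem.Dict.empty
        (fun d => d.insert "story_type" (PySem.Str.strip (String.ofList (s.toList.drop 13)))))
    else if PySem.Str.startswith s "- Use when:" then
      (st.1, st.2.modify st.1 PySem.Dict.empty
        (fun d => d.insert "use_when" (PySem.Str.strip (String.ofList (s.toList.drop 11)))))
    else if PySem.Str.startswith s "- Core point:" then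
      (st.1, st.2.modify st.1 PySem.Dict.empty
        (fun d => d.insert "core_point" (PySem.Str.strip (String.ofList (s.toList.drop 13)))))
    else st
  else st

def parse_story_bank_py_alt (text : String) : List (List (String × String)) :=
  ((((PySem.Str.splitlines (pvStripFM_alt text)).foldl pvAltStep ("", PySem.Dict.empty)).2.values).map
    PySem.Dict.items)

-- ===== PRECONDITION & SPEC =====
def Spec_parse_story_bank_py (text : String) (out : List (List (String × String))) : Prop := out = parse_story_bank_py_alt text
instance (text : String) (out : List (List (String × String))) : Decidable (Spec_parse_story_bank_py text out) := by unfold Spec_parse_story_bank_py; infer_instance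

-- ===== CLAIM (what is proved, stated in full; the proofs are below) =====
def Claim_equal_parse_story_bank_py : Prop := ∀ (text : String), Dom_parse_story_bank_py text → Spec_parse_story_bank_py text (parse_story_bank_py text)

-- ===== LEMMAS AND PROOFS =====

-- A's story for a title and its collected section lines
def pvStory (t : String) (ls : List String) : PySem.Dict String String :=
  ls.foldl pvStoryStep (pvInitStory t)

-- B's dict entry for each section entry of A
def pvMapF (l : List (String × List String)) : List (String × PySem.Dict String String) :=
  l.map (fun p => (p.1, pvStory p.1 p.2))

lemma pv_rstrip_cons (c : Char) (cs : List Char) :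
    PySem.Chars.rstrip (c :: cs) =
      if PySem.Chars.rstrip cs = [] then (if PySem.Chars.isspace c then [] else [c])
      else c :: PySem.Chars.rstrip cs := by
  simp only [PySem.Chars.rstrip, List.reverse_cons, List.dropWhile_append,
    List.isEmpty_iff, List.reverse_eq_nil_iff, List.dropWhile]
  split_ifs with h1 h2 <;> simp_all

lemma pv_rstrip_eq_nil_iff (cs : List Char) :
    PySem.Chars.rstrip cs = [] ↔ ∀ x ∈ cs, PySem.Chars.isspace x := by
  simp [PySem.Chars.rstrip, List.dropWhile_eq_nil_iff]

lemma pv_lstrip_rstrip (s : List Char) :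
    PySem.Chars.lstrip (PySem.Chars.rstrip s) = PySem.Chars.rstrip (PySem.Chars.lstrip s) := by
  induction s with
  | nil => rfl
  | cons c cs ih =>
    rw [pv_rstrip_cons]
    simp only [PySem.Chars.lstrip, List.dropWhile_cons] at *
    by_cases hc : PySem.Chars.isspace c <;> by_cases h0 : PySem.Chars.rstrip cs = []
    · have hnil : List.dropWhile PySem.Chars.isspace cs = [] :=
        List.dropWhile_eq_nil_iff.mpr (fun x hx => (pv_rstrip_eq_nil_iff cs).mp h0 x hx)
      rw [if_pos h0, if_pos hc]
      simp [hc, hnil, PySem.Chars.rstrip]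
    · simpa [hc, h0] using ih
    · simp [hc, h0, pv_rstrip_cons]
    · simp [hc, h0, pv_rstrip_cons]

lemma pv_strip_rstrip (s : List Char) :
    PySem.Chars.strip (PySem.Chars.rstrip s) = PySem.Chars.strip s := by
  simp only [PySem.Chars.strip, pv_lstrip_rstrip]
  simp [PySem.Chars.rstrip, List.reverse_reverse, List.dropWhile_idempotent]

lemma pv_str_strip_rstrip (s : String) :
    PySem.Str.strip (PySem.Str.rstrip s) = PySem.Str.strip s := by
  apply String.toList_inj.mp
  rw [PySem.Str.toList_strip, PySem.Str.toList_strip, PySem.Str.toList_rstrip, pv_strip_rstrip]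

lemma pv_replaceEmpty1_of_prefix {old s : List Char} (h : old <+: s) :
    pvReplaceEmpty1 s old = s.drop old.length := by
  have hnn : 0 ≤ PySem.Chars.find s old := (PySem.Chars.find_nonneg_iff s old).mpr h.isInfix
  obtain ⟨h1, h2⟩ := PySem.Chars.find_spec hnn
  have hz : (PySem.Chars.find s old).toNat = 0 := by
    by_contra hne
    exact h2 0 (Nat.pos_of_ne_zero hne) (by simpa using h)
  simp [pvReplaceEmpty1, not_lt.mpr hnn, hz]

-- dict transport facts -------------------------------------------------------

lemma pv_keys_mapF (l : List (String × List String)) :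
    (pvMapF l).map Prod.fst = l.map Prod.fst := by
  simp [pvMapF, List.map_map, Function.comp]

lemma pv_contains_mapF (l : List (String × List String)) (k : String) :
    (PySem.Dict.mk (pvMapF l)).contains k = (PySem.Dict.mk l).contains k := by
  simp [PySem.Dict.contains, pvMapF, List.any_map, Function.comp_def]

lemma pv_get?_mapF (l : List (String × List String)) (k : String) :
    (PySem.Dict.mk (pvMapF l)).get? k = ((PySem.Dict.mk l).get? k).map (pvStory k) := by
  induction l with
  | nil => simp [pvMapF, PySem.Dict.get?]
  | cons p l ih =>
    rcases p with ⟨a, b⟩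
    show (PySem.Dict.mk ((a, pvStory a b) :: pvMapF l)).get? k = _
    rw [PySem.Dict.get?_mk_cons, PySem.Dict.get?_mk_cons]
    by_cases hak : a = k
    · subst hak; simp
    · simp only [beq_iff_eq, hak, if_false, ih]

lemma pv_insert_mapF (l : List (String × List String)) (k : String) (v : List String) :
    PySem.Dict.mk (pvMapF (((PySem.Dict.mk l).insert k v).items)) =
      (PySem.Dict.mk (pvMapF l)).insert k (pvStory k v) := by
  simp only [PySem.Dict.insert, pv_contains_mapF]
  split_ifs with h
  · apply PySem.Dict.ext
    show pvMapF (l.map _) = (pvMapF l).map _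
    simp only [pvMapF, List.map_map]
    apply List.map_congr_left
    intro p _
    by_cases hp : p.1 = k
    · simp [Function.comp, hp]
    · simp [Function.comp, hp]
  · apply PySem.Dict.ext
    show pvMapF (l ++ [(k, v)]) = pvMapF l ++ [(k, pvStory k v)]
    simp [pvMapF]

lemma pv_get?_contains {ν : Type} (d : PySem.Dict String ν) (k : String) {v : ν}
    (h : d.get? k = some v) : d.contains k = true := by
  simp only [PySem.Dict.get?, Option.map_eq_some_iff] at h
  obtain ⟨p, hp, -⟩ := h
  have := List.find?_some hp
  have hmem := List.mem_of_find?_eq_some hp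
  simp only [PySem.Dict.contains, List.any_eq_true]
  exact ⟨p, hmem, this⟩

lemma pv_contains_get? {ν : Type} (d : PySem.Dict String ν) (k : String)
    (h : d.contains k = true) : ∃ v, d.get? k = some v := by
  simp only [PySem.Dict.contains, List.any_eq_true] at h
  obtain ⟨p, hp, hpk⟩ := h
  have : (List.find? (fun p => p.1 == k) d.items).isSome := List.find?_isSome.mpr ⟨p, hp, hpk⟩
  obtain ⟨q, hq⟩ := Option.isSome_iff_exists.mp this
  exact ⟨q.2, by simp [PySem.Dict.get?, hq]⟩

lemma pv_map_replace_id {ν : Type} (l : List (String × ν)) (k : String) (v : ν)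
    (hnd : (l.map Prod.fst).Nodup) (h : (PySem.Dict.mk l).get? k = some v) :
    l.map (fun p => if p.1 == k then (k, v) else p) = l := by
  induction l with
  | nil => rfl
  | cons p l ih =>
    rcases p with ⟨a, b⟩
    rw [PySem.Dict.get?_mk_cons] at h
    simp only [List.map_cons, List.nodup_cons] at hnd
    by_cases hak : a = k
    · subst hak
      simp only [beq_self_eq_true, if_true, Option.some_inj] at h
      subst h
      simp only [List.map_cons, beq_self_eq_true, if_true, List.cons.injEq, true_and]
      have hid : ∀ p ∈ l, (if (p.1 == a) = true then (a, b) else p) = p := by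
        intro p hp
        have : p.1 ≠ a := fun he => hnd.1 (he ▸ List.mem_map_of_mem hp)
        simp [this]
      rw [List.map_congr_left hid]
      simp
    · simp only [beq_iff_eq, hak, if_false] at h
      have hfalse : (a == k) = false := by simp [hak]
      simp only [List.map_cons, hfalse, Bool.false_eq_true, if_false, List.cons.injEq, true_and]
      exact ih hnd.2 h

lemma pv_insert_self_of_get? {ν : Type} (l : List (String × ν)) (k : String) (v : ν)
    (hnd : (l.map Prod.fst).Nodup) (h : (PySem.Dict.mk l).get? k = some v) :
    (PySem.Dict.mk l).insert k v = PySem.Dict.mk l := by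
  have hc : (PySem.Dict.mk l).contains k = true := pv_get?_contains _ _ h
  simp only [PySem.Dict.insert, hc, if_true]
  exact PySem.Dict.ext (pv_map_replace_id l k v hnd h)

lemma pv_keys_insert_nodup {ν : Type} (d : PySem.Dict String ν) (k : String) (v : ν)
    (hnd : d.keys.Nodup) : (d.insert k v).keys.Nodup := by
  simp only [PySem.Dict.insert]
  split_ifs with h
  · have : (d.items.map (fun p => if p.1 == k then (k, v) else p)).map Prod.fst
        = d.items.map Prod.fst := by
      simp only [List.map_map]
      apply List.map_congr_left
      intro p _
      by_cases hp : p.1 = k <;> simp [Function.comp, hp]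
    show (List.map Prod.fst _).Nodup
    rw [this]
    exact hnd
  · show ((d.items ++ [(k, v)]).map Prod.fst).Nodup
    rw [List.map_append]
    simp only [PySem.Dict.contains, List.any_eq_true, not_exists, not_and] at h
    have hk : k ∉ d.items.map Prod.fst := by
      simp only [List.mem_map, not_exists, not_and]
      intro p hp he
      have := h p hp
      simp [he] at this
    simp only [List.map_cons, List.map_nil]
    exact List.Nodup.append hnd (List.nodup_singleton _) (by
      intro a ha hb
      simp only [List.mem_singleton] at hb
      exact hk (hb ▸ ha))

-- the single-step simulation -------------------------------------------------

def pvInv (cur : String) (secs : PySem.Dict String (List String))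
    (d : PySem.Dict String (PySem.Dict String String)) : Prop :=
  d = PySem.Dict.mk (pvMapF secs.items) ∧ (cur ≠ "" → secs.contains cur = true) ∧ secs.keys.Nodup

lemma pv_step (cur : String) (secs : PySem.Dict String (List String))
    (d : PySem.Dict String (PySem.Dict String String)) (line : String)
    (h : pvInv cur secs d) :
    (pvAltStep (cur, d) line).1 = (pvSecStep (cur, secs) line).1 ∧
    pvInv (pvSecStep (cur, secs) line).1 (pvSecStep (cur, secs) line).2 (pvAltStep (cur, d) line).2 := by
  obtain ⟨hd, hcur, hnd⟩ := h
  by_cases hh : PySem.Str.startswith line "## " = true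
  · -- a "## " heading line: both sides open a fresh section / fresh story at the title
    have hpre : "## ".toList <+: line.toList := by
      rw [PySem.Str.startswith_eq] at hh
      exact (PySem.Chars.startswith_iff _ _).mp hh
    have hrep : pvReplaceEmpty1 line.toList "## ".toList = line.toList.drop 3 := by
      simpa using pv_replaceEmpty1_of_prefix hpre
    simp only [pvSecStep, pvAltStep, hh, if_true, hrep]
    exact ⟨by trivial,
      by rw [hd, pv_insert_mapF]; rfl,
      fun _ => PySem.Dict.contains_insert_self _ _ _,
      pv_keys_insert_nodup _ _ _ hnd⟩
  · have hhf : PySem.Str.startswith line "## " = false := by simpa using hh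
    by_cases hc0 : cur = ""
    · -- no current section: both sides ignore the line
      subst hc0
      simp only [pvSecStep, pvAltStep, hhf, Bool.false_eq_true, ne_eq,
        not_true_eq_false, if_neg, not_false_eq_true]
      exact ⟨by trivial, hd, hcur, hnd⟩
    · have hcont := hcur hc0
      obtain ⟨ls, hls⟩ := pv_contains_get? secs cur hcont
      have hgd : secs.getD cur [] = ls := by simp [PySem.Dict.getD, hls]
      have hss : PySem.Str.strip (PySem.Str.rstrip line) = PySem.Str.strip line :=
        pv_str_strip_rstrip line
      have hA : pvSecStep (cur, secs) line
          = (cur, secs.insert cur (ls ++ [PySem.Str.rstrip line])) := by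
        unfold pvSecStep
        rw [if_neg hh, if_pos hc0]
        simp [PySem.Dict.modify, hgd]
      have hgdB : d.getD cur PySem.Dict.empty = pvStory cur ls := by
        rw [hd]
        simp [PySem.Dict.getD, pv_get?_mapF, hls]
      have hstep : pvStory cur (ls ++ [PySem.Str.rstrip line])
          = pvStoryStep (pvStory cur ls) (PySem.Str.rstrip line) := by
        simp [pvStory, List.foldl_append]
      have hmap : PySem.Dict.mk (pvMapF ((secs.insert cur (ls ++ [PySem.Str.rstrip line])).items))
          = (PySem.Dict.mk (pvMapF secs.items)).insert cur
              (pvStoryStep (pvStory cur ls) (PySem.Str.rstrip line)) := by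
        rw [pv_insert_mapF, hstep]
      have hsecnd := pv_keys_insert_nodup secs cur (ls ++ [PySem.Str.rstrip line]) hnd
      have hseccont : (secs.insert cur (ls ++ [PySem.Str.rstrip line])).contains cur = true :=
        PySem.Dict.contains_insert_self _ _ _
      rw [hA]
      by_cases h1 : PySem.Str.startswith (PySem.Str.strip line) "- Story type:" = true
      · have hp : "- Story type:".toList <+: (PySem.Str.strip line).toList := by
          rw [PySem.Str.startswith_eq] at h1
          exact (PySem.Chars.startswith_iff _ _).mp h1
        have hrep1 : pvReplaceEmpty1 (PySem.Str.strip line).toList "- Story type:".toList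
            = (PySem.Str.strip line).toList.drop 13 := by
          simpa using pv_replaceEmpty1_of_prefix hp
        have hstep1 : pvStoryStep (pvStory cur ls) (PySem.Str.rstrip line)
            = (pvStory cur ls).insert "story_type"
                (PySem.Str.strip (String.ofList ((PySem.Str.strip line).toList.drop 13))) := by
          simp only [pvStoryStep, hss, h1, if_true, hrep1]
        simp only [pvAltStep, hhf, Bool.false_eq_true, if_false, hc0, ne_eq,
          not_false_eq_true, if_true, h1, PySem.Dict.modify, hgdB]
        exact ⟨by trivial, by rw [hd, hmap, hstep1], fun _ => hseccont, hsecnd⟩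
      · by_cases h2 : PySem.Str.startswith (PySem.Str.strip line) "- Use when:" = true
        · have hp : "- Use when:".toList <+: (PySem.Str.strip line).toList := by
            rw [PySem.Str.startswith_eq] at h2
            exact (PySem.Chars.startswith_iff _ _).mp h2
          have hrep2 : pvReplaceEmpty1 (PySem.Str.strip line).toList "- Use when:".toList
              = (PySem.Str.strip line).toList.drop 11 := by
            simpa using pv_replaceEmpty1_of_prefix hp
          have hstep2 : pvStoryStep (pvStory cur ls) (PySem.Str.rstrip line)
              = (pvStory cur ls).insert "use_when"
                  (PySem.Str.strip (String.ofList ((PySem.Str.strip line).toList.drop 11))) := by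
            simp only [pvStoryStep, hss, h1, Bool.false_eq_true, if_false, h2, if_true, hrep2]
          simp only [pvAltStep, hhf, Bool.false_eq_true, if_false, hc0, ne_eq,
            not_false_eq_true, if_true, h1, h2, PySem.Dict.modify, hgdB]
          exact ⟨by trivial, by rw [hd, hmap, hstep2], fun _ => hseccont, hsecnd⟩
        · by_cases h3 : PySem.Str.startswith (PySem.Str.strip line) "- Core point:" = true
          · have hp : "- Core point:".toList <+: (PySem.Str.strip line).toList := by
              rw [PySem.Str.startswith_eq] at h3
              exact (PySem.Chars.startswith_iff _ _).mp h3
            have hrep3 : pvReplaceEmpty1 (PySem.Str.strip line).toList "- Core point:".toList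
                = (PySem.Str.strip line).toList.drop 13 := by
              simpa using pv_replaceEmpty1_of_prefix hp
            have hstep3 : pvStoryStep (pvStory cur ls) (PySem.Str.rstrip line)
                = (pvStory cur ls).insert "core_point"
                    (PySem.Str.strip (String.ofList ((PySem.Str.strip line).toList.drop 13))) := by
              simp only [pvStoryStep, hss, h1, h2, Bool.false_eq_true, if_false, h3, if_true, hrep3]
            simp only [pvAltStep, hhf, Bool.false_eq_true, if_false, hc0, ne_eq,
              not_false_eq_true, if_true, h1, h2, h3, PySem.Dict.modify, hgdB]
            exact ⟨by trivial, by rw [hd, hmap, hstep3], fun _ => hseccont, hsecnd⟩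
          · -- no field marker: A appends a line that changes nothing; B leaves the dict alone
            have hstep0 : pvStoryStep (pvStory cur ls) (PySem.Str.rstrip line)
                = pvStory cur ls := by
              simp only [pvStoryStep, hss, h1, h2, h3, Bool.false_eq_true, if_false]
            have hnd' : ((pvMapF secs.items).map Prod.fst).Nodup := by
              rw [pv_keys_mapF]
              simpa [PySem.Dict.keys] using hnd
            have hget : (PySem.Dict.mk (pvMapF secs.items)).get? cur = some (pvStory cur ls) := by
              simp [pv_get?_mapF, hls]
            have hfix : (PySem.Dict.mk (pvMapF secs.items)).insert cur (pvStory cur ls)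
                = PySem.Dict.mk (pvMapF secs.items) :=
              pv_insert_self_of_get? _ _ _ hnd' hget
            simp only [pvAltStep, hhf, Bool.false_eq_true, if_false, hc0, ne_eq,
              not_false_eq_true, if_true, h1, h2, h3]
            exact ⟨by trivial, by rw [hd, hmap, hstep0, hfix], fun _ => hseccont, hsecnd⟩

lemma pv_fold (lines : List String) (cur : String) (secs : PySem.Dict String (List String))
    (d : PySem.Dict String (PySem.Dict String String)) (h : pvInv cur secs d) :
    (lines.foldl pvAltStep (cur, d)).1 = (lines.foldl pvSecStep (cur, secs)).1 ∧
    pvInv (lines.foldl pvSecStep (cur, secs)).1 (lines.foldl pvSecStep (cur, secs)).2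
      (lines.foldl pvAltStep (cur, d)).2 := by
  induction lines generalizing cur secs d with
  | nil => exact ⟨by trivial, h⟩
  | cons l ls ih =>
    obtain ⟨h1, h2⟩ := pv_step cur secs d l h
    have hpair : pvAltStep (cur, d) l = ((pvSecStep (cur, secs) l).1, (pvAltStep (cur, d) l).2) :=
      Prod.ext h1 rfl
    have := ih (pvSecStep (cur, secs) l).1 (pvSecStep (cur, secs) l).2 (pvAltStep (cur, d) l).2 h2
    rw [List.foldl_cons, List.foldl_cons, hpair]
    simpa using this

-- ===== VERDICT (by name: the statement is the Claim_ definition above) =====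
set_option maxHeartbeats 1000000 in
theorem parse_story_bank_py_spec : Claim_equal_parse_story_bank_py := by
  intro text _
  have h0 : pvInv "" PySem.Dict.empty PySem.Dict.empty :=
    ⟨rfl, by simp, by simp [PySem.Dict.empty, PySem.Dict.keys]⟩
  obtain ⟨-, hd, -, -⟩ :=
    pv_fold (PySem.Str.splitlines (pvStripFM text)) "" PySem.Dict.empty PySem.Dict.empty h0
  show parse_story_bank_py text = parse_story_bank_py_alt text
  unfold parse_story_bank_py parse_story_bank_py_alt pvSections
  have hfm : pvStripFM_alt text = pvStripFM text := rfl
  rw [hfm, hd, PySem.List.foldl_append_singleton_eq_map]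
  simp [PySem.Dict.values, pvMapF, pvStory, List.map_map, Function.comp]
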